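-- pv_equiv track=rewrite | github.com/cherry51015/Youtube-eBook | scripts/05_verify.py | annotate_chapter_markdown
-- ===== SOURCE A (Python) =====
-- def annotate_chapter_markdown(md_text: str, flagged_paras: set[str]) -> str:
--     if not flagged_paras:
--         return md_text
--     lines = md_text.split("\n")
--     result = []
--     buf = []
--
--     def flush_buf():
--         block = "\n".join(buf).strip()
--         if block in flagged_paras:
--             result.append("<!-- VERIFY: low grounding score -->\n" + block)
--         else:
--             result.append(block)
--         buf.clear()
--
--     for line in lines:
--         if line.strip() == "":
--             if buf:
--                 flush_buf()
--             result.append("")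
--         else:
--             buf.append(line)
--
--     if buf:
--         flush_buf()
--
--     return "\n".join(result)
-- ===== SOURCE B (Python) =====
-- def annotate_chapter_markdown(md_text: str, flagged_paras: set[str]) -> str:
--     if not flagged_paras:
--         return md_text
--     lines = md_text.split("\n")
--     n = len(lines)
--     blanks = [i for i in range(n) if lines[i].strip() == ""]
--     bounds = [-1] + blanks + [n]
--     pieces = []
--     for a, b in zip(bounds, bounds[1:]):
--         seg = lines[a + 1:b]
--         if seg:
--             block = "\n".join(seg).strip()
--             if block in flagged_paras:
--                 block = "<!-- VERIFY: low grounding score -->\n" + block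
--             pieces.append(block)
--         if b < n:
--             pieces.append("")
--     return "\n".join(pieces)
-- ===== Notes on version B (the rewrite author's own statement) =====
-- stated objective: alternative
-- what changed: Instead of A's streaming buffer/flush state machine, B first computes the list of blank-line indices, then slices each paragraph out of the line list by consecutive index-pair bounds and assembles the pieces (two staged passes over an index structure, random-access slicing, no running buffer).
import Mathlib
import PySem

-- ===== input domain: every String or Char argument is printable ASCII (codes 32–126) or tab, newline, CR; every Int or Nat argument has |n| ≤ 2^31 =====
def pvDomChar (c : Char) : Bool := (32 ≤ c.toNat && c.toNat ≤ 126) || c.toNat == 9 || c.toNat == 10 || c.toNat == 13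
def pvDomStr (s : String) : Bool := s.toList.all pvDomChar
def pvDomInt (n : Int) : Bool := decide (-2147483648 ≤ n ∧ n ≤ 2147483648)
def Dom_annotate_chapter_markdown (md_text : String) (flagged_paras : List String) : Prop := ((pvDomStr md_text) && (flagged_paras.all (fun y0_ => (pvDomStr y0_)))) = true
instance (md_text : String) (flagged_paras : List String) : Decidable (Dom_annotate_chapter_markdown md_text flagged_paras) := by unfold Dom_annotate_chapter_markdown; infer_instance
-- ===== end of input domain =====

-- B replaces A's streaming buffer/flush state machine by a staged index computation:
-- collect the blank-line indices first, then slice each paragraph out by consecutive bound pairs.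


-- ===== PORT A =====
-- flush_buf: strip the joined buffer, annotate if flagged, append
def pvFlushA (flagged_paras : List String) (buf : List String) : String :=
  let block := PySem.Str.strip (PySem.Str.join "\n" buf)
  if flagged_paras.contains block then "<!-- VERIFY: low grounding score -->\n" ++ block
  else block

def annotate_chapter_markdown (md_text : String) (flagged_paras : List String) : String :=
  if flagged_paras.isEmpty then md_text
  else
    let lines := (PySem.Str.split? md_text "\n").getD []
    let st := lines.foldl (fun (st : List String × List String) line =>
      if PySem.Str.strip line = "" then
        (if st.2 = [] then st.1 ++ [""] else st.1 ++ [pvFlushA flagged_paras st.2, ""], [])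
      else (st.1, st.2 ++ [line])) ([], [])
    let result := st.1 ++ (if st.2 = [] then [] else [pvFlushA flagged_paras st.2])
    PySem.Str.join "\n" result

-- ===== PORT B =====
def annotate_chapter_markdown_alt (md_text : String) (flagged_paras : List String) : String :=
  if flagged_paras.isEmpty then md_text
  else
    let lines := (PySem.Str.split? md_text "\n").getD []
    let n : Int := lines.length
    let blanks := (PySem.List.pyRange 0 n 1).filter
      (fun i => PySem.Str.strip ((PySem.List.pyGet? lines i).getD "") == "")
    let bounds := [-1] ++ blanks ++ [n]
    let pieces := (List.zip bounds (PySem.List.slice bounds (some 1) none)).foldl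
      (fun acc p =>
        let seg := PySem.List.slice lines (some (p.1 + 1)) (some p.2)
        let acc1 :=
          if seg.isEmpty then acc
          else
            let block := PySem.Str.strip (PySem.Str.join "\n" seg)
            let block := if flagged_paras.contains block then "<!-- VERIFY: low grounding score -->\n" ++ block else block
            acc ++ [block]
        if p.2 < n then acc1 ++ [""] else acc1) []
    PySem.Str.join "\n" pieces

-- ===== PRECONDITION & SPEC =====
def Spec_annotate_chapter_markdown (md_text : String) (flagged_paras : List String) (out : String) : Prop := out = annotate_chapter_markdown_alt md_text flagged_paras
instance (md_text : String) (flagged_paras : List String) (out : String) : Decidable (Spec_annotate_chapter_markdown md_text flagged_paras out) := by unfold Spec_annotate_chapter_markdown; infer_instance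

-- ===== CLAIM (what is proved, stated in full; the proofs are below) =====
def Claim_equal_annotate_chapter_markdown : Prop := ∀ (md_text : String) (flagged_paras : List String), Dom_annotate_chapter_markdown md_text flagged_paras → Spec_annotate_chapter_markdown md_text flagged_paras (annotate_chapter_markdown md_text flagged_paras)

-- ===== LEMMAS AND PROOFS =====
def pvBIdx : List String → List Int
  | [] => []
  | x :: ys => if PySem.Str.strip x = "" then 0 :: (pvBIdx ys).map (· + 1) else (pvBIdx ys).map (· + 1)

lemma pvBIdx_eq (lines : List String) :
    ((PySem.List.pyRange 0 (lines.length : Int) 1).filter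
      (fun i => PySem.Str.strip ((PySem.List.pyGet? lines i).getD "") == "")) = pvBIdx lines := by
  induction lines with
  | nil => simp [pvBIdx]
  | cons x ys ih =>
    rw [show ((x :: ys).length : Int) = ((ys.length + 1 : Nat) : Int) by simp,
        PySem.List.pyRange_zero_natCast, List.range_succ_eq_map]
    rw [PySem.List.pyRange_zero_natCast] at ih
    simp only [List.map_cons, List.filter_cons, List.map_map, List.filter_map] at *
    have hpred : ((fun i => PySem.Str.strip ((PySem.List.pyGet? (x :: ys) i).getD "") == "") ∘ (fun k => ((k:Nat):Int)) ∘ Nat.succ)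
        = ((fun i => PySem.Str.strip ((PySem.List.pyGet? ys i).getD "") == "") ∘ fun k => ((k:Nat):Int)) := by
      funext i
      simp only [Function.comp, Nat.succ_eq_add_one, PySem.List.pyGet?_natCast]
      rfl
    have hcomp : ((fun k => ((k:Nat):Int)) ∘ Nat.succ) = (fun j => j + 1) ∘ (fun k => ((k:Nat):Int)) := by
      funext k; simp [Nat.succ_eq_add_one]
    rw [hpred, hcomp, ← List.map_map, ih]
    have h0 : (PySem.List.pyGet? (x :: ys) ((0:Nat):Int)).getD "" = x := by
      rw [PySem.List.pyGet?_natCast]; rfl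
    rw [h0]
    unfold pvBIdx
    by_cases hx : PySem.Str.strip x = "" <;> simp [hx] <;> rw [← pvBIdx.eq_def]

lemma pvBIdx_bounds (ls : List String) : ∀ j ∈ pvBIdx ls, 0 ≤ j ∧ j < (ls.length : Int) := by
  induction ls with
  | nil => simp [pvBIdx]
  | cons x ys ih =>
    intro j hj
    have hmem : j = 0 ∨ ∃ a ∈ pvBIdx ys, j = a + 1 := by
      unfold pvBIdx at hj
      split at hj
      · rcases List.mem_cons.1 hj with h | h
        · left; exact h
        · right; rcases List.mem_map.1 h with ⟨a, ha, rfl⟩; exact ⟨a, ha, rfl⟩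
      · right; rcases List.mem_map.1 hj with ⟨a, ha, rfl⟩; exact ⟨a, ha, rfl⟩
    rcases hmem with rfl | ⟨a, ha, rfl⟩
    · refine ⟨le_refl _, ?_⟩; simp only [List.length_cons]; push_cast; omega
    · obtain ⟨h1, h2⟩ := ih a ha
      simp only [List.length_cons]; push_cast; omega

lemma pvBIdx_nil_of (ls : List String) (h : ∀ l ∈ ls, ¬ PySem.Str.strip l = "") : pvBIdx ls = [] := by
  induction ls with
  | nil => rfl
  | cons x ys ih => simp [pvBIdx, h x (by simp), ih (fun l hl => h l (by simp [hl]))]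

lemma pvBIdx_append (pre : List String) (bl : String) (rest : List String)
    (h : ∀ l ∈ pre, ¬ PySem.Str.strip l = "") (hb : PySem.Str.strip bl = "") :
    pvBIdx (pre ++ bl :: rest) =
      (pre.length : Int) :: (pvBIdx rest).map (· + ((pre.length : Int) + 1)) := by
  induction pre with
  | nil => simp [pvBIdx, hb]
  | cons x pre ih =>
    have hx := h x (by simp)
    simp only [List.cons_append, pvBIdx, if_neg hx, ih (fun l hl => h l (by simp [hl]))]
    simp only [List.map_cons, List.map_map, List.length_cons]
    refine congrArg₂ List.cons (by push_cast; ring) ?_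
    refine List.map_congr_left (fun a _ => ?_)
    simp only [Function.comp_apply]
    push_cast; ring

def pvPieceB (fp : List String) (lines : List String) (p : Int × Int) : List String :=
  (if (PySem.List.slice lines (some (p.1 + 1)) (some p.2)).isEmpty then []
   else [pvFlushA fp (PySem.List.slice lines (some (p.1 + 1)) (some p.2))]) ++
  (if p.2 < (lines.length : Int) then [""] else [])

lemma pvPieceB_shift (fp : List String) (pre : List String) (bl : String) (rest : List String)
    (a b : Int) (ha : -1 ≤ a) (hb0 : 0 ≤ b) (hbn : b ≤ (rest.length : Int)) :
    pvPieceB fp (pre ++ bl :: rest) (a + ((pre.length : Int) + 1), b + ((pre.length : Int) + 1)) =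
      pvPieceB fp rest (a, b) := by
  have hseg : PySem.List.slice (pre ++ bl :: rest) (some (a + ((pre.length : Int) + 1) + 1))
      (some (b + ((pre.length : Int) + 1))) = PySem.List.slice rest (some (a + 1)) (some b) := by
    rw [PySem.List.slice_toNat _ (by omega) (by omega),
        PySem.List.slice_toNat _ (by omega) (by omega)]
    have h1 : (a + ((pre.length : Int) + 1) + 1).toNat = (pre ++ [bl]).length + (a + 1).toNat := by
      simp [List.length_append]; omega
    have h2 : (b + ((pre.length : Int) + 1)).toNat - (a + ((pre.length : Int) + 1) + 1).toNat
        = b.toNat - (a + 1).toNat := by omega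
    rw [h2, h1, show pre ++ bl :: rest = (pre ++ [bl]) ++ rest by simp,
        List.drop_length_add_append]
  unfold pvPieceB
  by_cases hlt : b < (rest.length : Int)
  · have h1 : b + ((pre.length : Int) + 1) < (pre.length : Int) + ((rest.length : Int) + 1) := by
      omega
    simp [hseg, h1, hlt]
  · have h1 : ¬ (b + ((pre.length : Int) + 1) < (pre.length : Int) + ((rest.length : Int) + 1)) := by
      omega
    simp [hseg, h1, hlt]

def pvNonBlank (l : String) : Bool := !(PySem.Str.strip l == "")

def pvGroups (flagged_paras : List String) : List String → List String
  | [] => []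
  | l :: ls =>
    if PySem.Str.strip l = "" then "" :: pvGroups flagged_paras ls
    else
      pvFlushA flagged_paras (l :: ls.takeWhile pvNonBlank) :: pvGroups flagged_paras (ls.dropWhile pvNonBlank)
  termination_by ls => ls.length
  decreasing_by
  · simp
  · exact Nat.lt_succ_of_le (List.length_dropWhile_le _ _)

lemma pvGroups_eq (fp : List String) (ls : List String) :
    pvGroups fp ls =
      if ls.takeWhile pvNonBlank = [] then pvGroups fp (ls.dropWhile pvNonBlank)
      else pvFlushA fp (ls.takeWhile pvNonBlank) :: pvGroups fp (ls.dropWhile pvNonBlank) := by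
  cases ls with
  | nil => simp [pvGroups]
  | cons l ls =>
    by_cases h : PySem.Str.strip l = ""
    · have hnb : pvNonBlank l = false := by simp [pvNonBlank, h]
      simp [hnb]
    · have hnb : pvNonBlank l = true := by simp [pvNonBlank, h]
      simp [pvGroups, hnb, h, pvFlushA]

def pvPairs (lines : List String) : List (Int × Int) :=
  List.zip (-1 :: pvBIdx lines ++ [(lines.length : Int)]) (pvBIdx lines ++ [(lines.length : Int)])

lemma pvFlatMap_congr {α β : Type} (l : List α) (f g : α → List β)
    (h : ∀ x ∈ l, f x = g x) : l.flatMap f = l.flatMap g := by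
  induction l with
  | nil => rfl
  | cons x xs ih => simp [List.flatMap_cons, h x (by simp), ih (fun y hy => h y (by simp [hy]))]

lemma pvPieces_eq_groups_aux (fp : List String) : ∀ (n : Nat) (lines : List String),
    lines.length ≤ n → (pvPairs lines).flatMap (pvPieceB fp lines) = pvGroups fp lines := by
  intro n
  induction n with
  | zero =>
    intro lines hlen
    have : lines = [] := List.eq_nil_of_length_eq_zero (Nat.le_zero.1 hlen)
    subst this
    simp [pvPairs, pvBIdx, pvGroups, pvPieceB, PySem.List.slice]
  | succ n ih =>
    intro lines hlen
    cases hdp : lines.dropWhile pvNonBlank with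
    | nil =>
      -- no blank line at all
      have hall : ∀ l ∈ lines, pvNonBlank l = true := by
        simpa using (List.dropWhile_eq_nil_iff).1 hdp
      have hnb : ∀ l ∈ lines, ¬ PySem.Str.strip l = "" := by
        intro l hl; have := hall l hl; simpa [pvNonBlank] using this
      have hB : pvBIdx lines = [] := pvBIdx_nil_of _ hnb
      rw [pvPairs, hB]
      simp only [List.singleton_append, List.nil_append, List.zip_cons_cons, List.zip_nil_right,
        List.flatMap_cons, List.flatMap_nil, List.append_nil]
      have hslice : PySem.List.slice lines (some (-1 + 1)) (some ((lines.length : Int))) = lines := by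
        rw [show (-1 + 1 : Int) = ((0:Nat):Int) by norm_num,
            show ((lines.length : Int)) = ((lines.length : Nat):Int) by norm_num,
            PySem.List.slice_natCast]
        simp
      unfold pvPieceB
      simp only [hslice, lt_irrefl, if_false, List.append_nil]
      cases hl : lines with
      | nil => simp [pvGroups]
      | cons l ls =>
        have htw : lines.takeWhile pvNonBlank = lines := List.takeWhile_eq_self_iff.2 hall
        rw [← hl]
        rw [pvGroups_eq, htw, hdp]
        simp [hl, pvGroups, pvFlushA]
    | cons bl rest =>
      have hlines : lines.takeWhile pvNonBlank ++ bl :: rest = lines := by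
        rw [← hdp]; exact List.takeWhile_append_dropWhile
      set pre := lines.takeWhile pvNonBlank with hpredef
      have hblb : pvNonBlank bl = false := by
        have := List.head_dropWhile_not pvNonBlank (l := lines) (by simp [hdp])
        simpa [hdp] using this
      have hbl : PySem.Str.strip bl = "" := by simpa [pvNonBlank] using hblb
      have hpre : ∀ l ∈ pre, ¬ PySem.Str.strip l = "" := by
        intro l hl
        have := List.mem_takeWhile_imp hl
        simpa [pvNonBlank] using this
      have hlen' : rest.length ≤ n := by
        have := congrArg List.length hlines
        simp [List.length_append] at this
        omega
      have hbidx : pvBIdx lines = (pre.length : Int) ::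
          (pvBIdx rest).map (· + ((pre.length : Int) + 1)) := by
        rw [← hlines]; exact pvBIdx_append pre bl rest hpre hbl
      have hn : ((lines.length : Int)) = (rest.length : Int) + ((pre.length : Int) + 1) := by
        rw [← hlines]; simp [List.length_append]; ring
      -- pairs decompose: head pair (-1, |pre|), then shifted pairs of rest
      have hL2 : (pre.length : Int) :: ((pvBIdx rest).map (· + ((pre.length : Int) + 1)) ++ [(lines.length : Int)])
          = List.map (· + ((pre.length : Int) + 1)) (-1 :: (pvBIdx rest ++ [(rest.length : Int)])) := by
        simp [List.map_append, hn]
      have hpairs : pvPairs lines = (-1, (pre.length : Int)) ::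
          (pvPairs rest).map (Prod.map (· + ((pre.length : Int) + 1)) (· + ((pre.length : Int) + 1))) := by
        rw [pvPairs, hbidx]
        simp only [List.cons_append, List.zip_cons_cons]
        congr 1
        rw [hL2]
        rw [show List.map (· + ((pre.length : Int) + 1)) (-1 :: (pvBIdx rest ++ [(rest.length : Int)]))
            = (-1 :: (pvBIdx rest ++ [(rest.length : Int)])).map (· + ((pre.length : Int) + 1)) from rfl]
        rw [show ((pvBIdx rest).map (· + ((pre.length : Int) + 1)) ++ [(lines.length : Int)])
            = (pvBIdx rest ++ [(rest.length : Int)]).map (· + ((pre.length : Int) + 1)) by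
          simp [List.map_append, hn]]
        rw [List.zip_map]
        rfl
      rw [hpairs, List.flatMap_cons]
      have hshift : ((pvPairs rest).map (Prod.map (· + ((pre.length : Int) + 1)) (· + ((pre.length : Int) + 1)))).flatMap (pvPieceB fp lines)
          = (pvPairs rest).flatMap (pvPieceB fp rest) := by
        rw [List.flatMap_map]
        apply pvFlatMap_congr
        intro p hp
        obtain ⟨h1, h2⟩ := List.of_mem_zip hp
        have hp1 : -1 ≤ p.1 := by
          rcases List.mem_cons.1 h1 with h | h
          · omega
          · rcases List.mem_append.1 h with h | h
            · have := (pvBIdx_bounds rest p.1 h).1; omega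
            · simp at h; omega
        have hp2 : 0 ≤ p.2 ∧ p.2 ≤ (rest.length : Int) := by
          rcases List.mem_append.1 h2 with h | h
          · have := pvBIdx_bounds rest p.2 h; omega
          · simp at h; omega
        have := pvPieceB_shift fp pre bl rest p.1 p.2 hp1 hp2.1 hp2.2
        rw [← hlines]
        simpa [Prod.map] using this
      rw [hshift, ih rest hlen']
      -- head piece
      have hslice : PySem.List.slice lines (some (-1 + 1)) (some ((pre.length : Int))) = pre := by
        rw [show (-1 + 1 : Int) = ((0:Nat):Int) by norm_num,
            show ((pre.length : Int)) = ((pre.length : Nat):Int) by norm_num,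
            PySem.List.slice_natCast, ← hlines]
        simp
      have hlt : (-1, (pre.length : Int)).2 < ((lines.length : Int)) := by
        simp only []; rw [hn]; omega
      have hhead : pvPieceB fp lines (-1, (pre.length : Int))
          = (if pre.isEmpty then [] else [pvFlushA fp pre]) ++ [""] := by
        unfold pvPieceB
        rw [hslice]
        simp only [hlt, if_pos]
      rw [hhead]
      -- right-hand side
      rw [pvGroups_eq fp lines, ← hpredef, hdp]
      have hgb : pvGroups fp (bl :: rest) = "" :: pvGroups fp rest := by
        simp [pvGroups, hbl]
      rw [hgb]
      by_cases hp : pre = []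
      · simp [hp]
      · simp [hp, List.isEmpty_iff]

lemma pvPieces_eq_groups (fp : List String) (lines : List String) :
    (pvPairs lines).flatMap (pvPieceB fp lines) = pvGroups fp lines :=
  pvPieces_eq_groups_aux fp lines.length lines (le_refl _)

-- ---- A-side fold characterisation ----
def pvTailA (fp : List String) : List String → List String → List String
  | [], buf => if buf = [] then [] else [pvFlushA fp buf]
  | l :: ls, buf =>
    if PySem.Str.strip l = "" then
      (if buf = [] then [] else [pvFlushA fp buf]) ++ "" :: pvTailA fp ls []
    else pvTailA fp ls (buf ++ [l])

lemma pvFoldA_eq (fp : List String) : ∀ (ls r buf : List String),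
    (let st := ls.foldl (fun (st : List String × List String) line =>
      if PySem.Str.strip line = "" then
        (if st.2 = [] then st.1 ++ [""] else st.1 ++ [pvFlushA fp st.2, ""], [])
      else (st.1, st.2 ++ [line])) (r, buf)
     st.1 ++ (if st.2 = [] then [] else [pvFlushA fp st.2])) = r ++ pvTailA fp ls buf := by
  intro ls
  induction ls with
  | nil => intro r buf; simp [pvTailA]
  | cons l ls ih =>
    intro r buf
    simp only [List.foldl_cons, pvTailA]
    by_cases h : PySem.Str.strip l = ""
    · simp only [h, if_true]
      by_cases hb : buf = []
      · simp [hb, ih]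
      · simp [hb, ih]
    · simp [h, ih]

lemma pvTailA_eq (fp : List String) : ∀ (ls buf : List String),
    pvTailA fp ls buf =
      if buf ++ ls.takeWhile pvNonBlank = [] then pvGroups fp (ls.dropWhile pvNonBlank)
      else pvFlushA fp (buf ++ ls.takeWhile pvNonBlank) :: pvGroups fp (ls.dropWhile pvNonBlank) := by
  intro ls
  induction ls with
  | nil => intro buf; simp [pvTailA, pvGroups]
  | cons l ls ih =>
    intro buf
    by_cases h : PySem.Str.strip l = ""
    · have hnb : pvNonBlank l = false := by simp [pvNonBlank, h]
      have hls : pvTailA fp ls [] = pvGroups fp ls := by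
        rw [ih []]; simp only [List.nil_append]
        exact (pvGroups_eq fp ls).symm
      simp only [pvTailA, h, if_true, List.takeWhile_cons, List.dropWhile_cons, hnb]
      by_cases hb : buf = []
      · simp [hb, hls, pvGroups, h]
      · simp [hb, hls, pvGroups, h]
    · have hnb : pvNonBlank l = true := by simp [pvNonBlank, h]
      simp only [pvTailA, h, if_false, List.takeWhile_cons, List.dropWhile_cons, hnb, ih (buf ++ [l])]
      simp

-- ===== VERDICT (by name: the statement is the Claim_ definition above) =====
theorem annotate_chapter_markdown_spec : Claim_equal_annotate_chapter_markdown := by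
  intro md_text fp _
  show _ = _
  unfold annotate_chapter_markdown annotate_chapter_markdown_alt
  by_cases he : fp.isEmpty
  · simp [he]
  · simp only [he, Bool.false_eq_true, if_false]
    set lines := (PySem.Str.split? md_text "\n").getD [] with hldef
    -- A side: the fold yields pvGroups
    have hA : (let st := lines.foldl (fun (st : List String × List String) line =>
        if PySem.Str.strip line = "" then
          (if st.2 = [] then st.1 ++ [""] else st.1 ++ [pvFlushA fp st.2, ""], [])
        else (st.1, st.2 ++ [line])) ([], [])
        st.1 ++ (if st.2 = [] then [] else [pvFlushA fp st.2])) = pvGroups fp lines := by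
      rw [pvFoldA_eq fp lines [] [], pvTailA_eq fp lines []]
      simp only [List.nil_append]
      exact (pvGroups_eq fp lines).symm
    -- B side: the pair fold yields the same pvGroups
    have hB : ((List.zip ([-1] ++ ((PySem.List.pyRange 0 ((lines.length : Int)) 1).filter
          (fun i => PySem.Str.strip ((PySem.List.pyGet? lines i).getD "") == "")) ++ [(lines.length : Int)])
          (PySem.List.slice ([-1] ++ ((PySem.List.pyRange 0 ((lines.length : Int)) 1).filter
          (fun i => PySem.Str.strip ((PySem.List.pyGet? lines i).getD "") == "")) ++ [(lines.length : Int)]) (some 1) none)).foldl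
        (fun acc p =>
          let seg := PySem.List.slice lines (some (p.1 + 1)) (some p.2)
          let acc1 :=
            if seg.isEmpty then acc
            else
              let block := PySem.Str.strip (PySem.Str.join "\n" seg)
              let block := if fp.contains block then "<!-- VERIFY: low grounding score -->\n" ++ block else block
              acc ++ [block]
          if p.2 < (lines.length : Int) then acc1 ++ [""] else acc1) []) = pvGroups fp lines := by
      rw [pvBIdx_eq lines, PySem.List.slice_from_one]
      have hbody : (fun (acc : List String) (p : Int × Int) =>
          let seg := PySem.List.slice lines (some (p.1 + 1)) (some p.2)
          let acc1 :=
            if seg.isEmpty then acc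
            else
              let block := PySem.Str.strip (PySem.Str.join "\n" seg)
              let block := if fp.contains block then "<!-- VERIFY: low grounding score -->\n" ++ block else block
              acc ++ [block]
          if p.2 < (lines.length : Int) then acc1 ++ [""] else acc1)
          = fun acc p => acc ++ pvPieceB fp lines p := by
        funext acc p
        simp only [pvPieceB, pvFlushA]
        split_ifs <;> simp
      rw [hbody, PySem.List.foldl_append_eq_flatMap]
      simp only [List.nil_append]
      rw [show ([-1] ++ pvBIdx lines ++ [(lines.length : Int)]) = -1 :: pvBIdx lines ++ [(lines.length : Int)] by simp] at *
      rw [show (-1 :: pvBIdx lines ++ [(lines.length : Int)]).tail = pvBIdx lines ++ [(lines.length : Int)] from rfl]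
      exact (pvPieces_eq_groups fp lines)
    simp only [] at hA hB ⊢
    rw [hA]
    rw [← hB]
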